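-- pv_equiv track=rewrite | github.com/gillesmag/adventofcode | 2018/day3/solution.py | max_claim
-- ===== SOURCE A (Python) =====
-- def max_claim(claims):
--     max_left, max_top = 0, 0
--     max_width, max_height = 0, 0
--
--     for claim in claims:
--         _, left, top, width, height = claim
--         if left > max_left:
--             max_left = left
--
--         if top > max_top:
--             max_top = top
--
--         if width > max_width:
--             max_width = width
--
--         if height > max_height:
--             max_height = height
--
--     return max_left, max_top, max_width, max_height
-- ===== SOURCE B (Python) =====
-- def max_claim(claims):
--     if not claims:
--         return (0, 0, 0, 0)
--     _, lefts, tops, widths, heights = zip(*claims)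
--     return (max(0, max(lefts)), max(0, max(tops)),
--             max(0, max(widths)), max(0, max(heights)))
-- ===== Notes on version B (the rewrite author's own statement) =====
-- stated objective: simpler
-- what changed: Replaces the fused loop of four conditional running-max updates with a zip(*claims) transpose followed by one max() reduction per column, floored at 0.
import Mathlib
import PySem

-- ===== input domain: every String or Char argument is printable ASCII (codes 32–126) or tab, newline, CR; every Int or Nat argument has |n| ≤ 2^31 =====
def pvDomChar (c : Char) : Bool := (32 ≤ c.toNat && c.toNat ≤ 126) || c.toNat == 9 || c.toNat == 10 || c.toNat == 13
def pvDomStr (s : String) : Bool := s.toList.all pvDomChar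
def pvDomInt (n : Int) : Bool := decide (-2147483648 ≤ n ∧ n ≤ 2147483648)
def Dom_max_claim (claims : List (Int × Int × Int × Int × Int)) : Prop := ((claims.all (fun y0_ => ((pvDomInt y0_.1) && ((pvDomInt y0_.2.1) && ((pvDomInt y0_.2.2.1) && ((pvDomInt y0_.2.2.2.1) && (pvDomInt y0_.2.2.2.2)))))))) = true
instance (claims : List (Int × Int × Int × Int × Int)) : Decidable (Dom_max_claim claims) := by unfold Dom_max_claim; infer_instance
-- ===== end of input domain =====

-- B replaces A's fused loop of four conditional running-max updates by a transpose
-- (per-field columns) followed by one max-reduction per column, floored at 0 (simpler).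

-- ===== PORT A =====
-- one fold over the claims carrying the four running maxima, branches in A's order
def max_claim (claims : List (Int × Int × Int × Int × Int)) : Int × Int × Int × Int :=
  claims.foldl
    (fun s c =>
      let ml := if c.2.1 > s.1 then c.2.1 else s.1
      let mt := if c.2.2.1 > s.2.1 then c.2.2.1 else s.2.1
      let mw := if c.2.2.2.1 > s.2.2.1 then c.2.2.2.1 else s.2.2.1
      let mh := if c.2.2.2.2 > s.2.2.2 then c.2.2.2.2 else s.2.2.2
      (ml, mt, mw, mh))
    (0, 0, 0, 0)

-- ===== PORT B =====
-- max(0, max(col)) for a nonempty column (Source B guards the empty case before zip)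
def pvColMax (col : List Int) : Int :=
  max 0 ((PySem.List.max? col (fun y => y)).getD 0)

def max_claim_alt (claims : List (Int × Int × Int × Int × Int)) : Int × Int × Int × Int :=
  match claims with
  | [] => (0, 0, 0, 0)
  | _ =>
    -- zip(*claims): the per-field columns (id column discarded)
    let lefts   := claims.map (fun c => c.2.1)
    let tops    := claims.map (fun c => c.2.2.1)
    let widths  := claims.map (fun c => c.2.2.2.1)
    let heights := claims.map (fun c => c.2.2.2.2)
    (pvColMax lefts, pvColMax tops, pvColMax widths, pvColMax heights)

-- ===== PRECONDITION & SPEC =====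
def Spec_max_claim (claims : List (Int × Int × Int × Int × Int)) (out : Int × Int × Int × Int) : Prop := out = max_claim_alt claims
instance (claims : List (Int × Int × Int × Int × Int)) (out : Int × Int × Int × Int) : Decidable (Spec_max_claim claims out) := by unfold Spec_max_claim; infer_instance

-- ===== CLAIM (what is proved, stated in full; the proofs are below) =====
def Claim_equal_max_claim : Prop := ∀ (claims : List (Int × Int × Int × Int × Int)), Dom_max_claim claims → Spec_max_claim claims (max_claim claims)

-- ===== LEMMAS AND PROOFS =====

theorem foldl_max_pull (t : List Int) (a x : Int) :
    max a (t.foldl max x) = t.foldl max (max a x) := by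
  induction t generalizing x with
  | nil => rfl
  | cons y t ih =>
    simp only [List.foldl_cons]
    rw [ih, max_assoc]

-- pvColMax of a nonempty column is the running max started at 0
theorem pvColMax_cons (x : Int) (t : List Int) :
    pvColMax (x :: t) = (x :: t).foldl max 0 := by
  simp only [pvColMax, PySem.List.max?_id_cons, Option.getD_some, List.foldl_cons]
  exact foldl_max_pull t 0 x

-- A's fold is the quadruple of per-field running maxima
theorem max_claim_fold (claims : List (Int × Int × Int × Int × Int))
    (a b c d : Int) :
    claims.foldl
      (fun s c =>
        let ml := if c.2.1 > s.1 then c.2.1 else s.1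
        let mt := if c.2.2.1 > s.2.1 then c.2.2.1 else s.2.1
        let mw := if c.2.2.2.1 > s.2.2.1 then c.2.2.2.1 else s.2.2.1
        let mh := if c.2.2.2.2 > s.2.2.2 then c.2.2.2.2 else s.2.2.2
        (ml, mt, mw, mh))
      (a, b, c, d)
    = ((claims.map (fun x => x.2.1)).foldl max a,
       (claims.map (fun x => x.2.2.1)).foldl max b,
       (claims.map (fun x => x.2.2.2.1)).foldl max c,
       (claims.map (fun x => x.2.2.2.2)).foldl max d) := by
  induction claims generalizing a b c d with
  | nil => rfl
  | cons h t ih =>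
    simp only [List.foldl_cons, List.map_cons]
    rw [ih]
    have hmax : ∀ (m x : Int), (if x > m then x else m) = max m x := by
      intro m x
      simp only [gt_iff_lt, max_def]
      split <;> split <;> omega
    simp only [hmax]

-- ===== VERDICT (by name: the statement is the Claim_ definition above) =====
theorem max_claim_spec : Claim_equal_max_claim := by
  intro claims _
  unfold Spec_max_claim
  cases claims with
  | nil => rfl
  | cons h t =>
    show max_claim (h :: t) = max_claim_alt (h :: t)
    unfold max_claim max_claim_alt
    rw [max_claim_fold]
    simp only [List.map_cons, pvColMax_cons]
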